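-- pv_equiv track=rewrite | github.com/Shnavo/Python | Calculator/Calculator.py | period_checker
-- ===== SOURCE A (Python) =====
-- def period_checker(input): # added here
--     i = 0
--     period = False
--     for symbol in input:
--         i += 1
--         if i == 1 and symbol == ".":
--             return False
--         elif i == len(input) and symbol == ".":
--             return False
--         elif symbol == ".":
--             if not period:
--                 period = True
--             else:
--                 return False
--     else:
--         if period: # better practice than period == True
--             return True
--         else:
--             return None
-- ===== SOURCE B (Python) =====
-- def period_checker(input):
--     if not input:
--         return None
--     if input[0] == "." or input[-1] == ".":
--         return False
--     n = input.count(".")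
--     if n == 0:
--         return None
--     elif n == 1:
--         return True
--     else:
--         return False
-- ===== Notes on version B (the rewrite author's own statement) =====
-- stated objective: faster
-- what changed: Replaced A's stateful per-character scan (position counter plus a period-seen flag with four early-return branches) by endpoint checks on the first and last character plus a str.count of the period character mapped to None/True/False.
import Mathlib
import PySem

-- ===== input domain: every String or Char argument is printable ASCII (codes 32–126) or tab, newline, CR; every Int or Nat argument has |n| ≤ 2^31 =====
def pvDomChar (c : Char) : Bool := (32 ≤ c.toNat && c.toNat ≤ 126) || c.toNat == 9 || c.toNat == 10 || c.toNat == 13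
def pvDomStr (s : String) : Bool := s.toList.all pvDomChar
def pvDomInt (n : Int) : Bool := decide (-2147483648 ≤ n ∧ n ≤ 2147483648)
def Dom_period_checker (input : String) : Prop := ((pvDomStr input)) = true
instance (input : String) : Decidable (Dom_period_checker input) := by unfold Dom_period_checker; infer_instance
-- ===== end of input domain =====

-- B replaces A's stateful scan by endpoint checks plus a '.'-count; same values, simpler decomposition.

-- ===== PORT A =====
-- the for-loop of A: state is (i, period); n = len(input) is fixed
def periodLoop (chars : List Char) (n : Nat) (i : Nat) (period : Bool) : Option Bool :=
  match chars with
  | [] => if period then some true else none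
  | symbol :: rest =>
      let i' := i + 1
      if i' = 1 ∧ symbol = '.' then some false
      else if i' = n ∧ symbol = '.' then some false
      else if symbol = '.' then
        if !period then periodLoop rest n i' true else some false
      else periodLoop rest n i' period

def period_checker (input : String) : Option Bool :=
  periodLoop input.toList input.toList.length 0 false

-- ===== PORT B =====
def period_checker_alt (input : String) : Option Bool :=
  if input.toList.isEmpty then none
  else if PySem.Str.pyGet? input 0 = some '.' ∨ PySem.Str.pyGet? input (-1) = some '.' then
    some false
  else
    let n := PySem.Str.count input "."
    if n = 0 then none
    else if n = 1 then some true
    else some false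

-- ===== PRECONDITION & SPEC =====
def Spec_period_checker (input : String) (out : Option Bool) : Prop := out = period_checker_alt input
instance (input : String) (out : Option Bool) : Decidable (Spec_period_checker input out) := by unfold Spec_period_checker; infer_instance

-- ===== CLAIM (what is proved, stated in full; the proofs are below) =====
def Claim_equal_period_checker : Prop := ∀ (input : String), Dom_period_checker input → Spec_period_checker input (period_checker input)

-- ===== LEMMAS AND PROOFS =====

-- str.count with a single-character needle is the character count
lemma count_go_singleton (c : Char) :
    ∀ (fuel : Nat) (l : List Char) (acc : Nat), l.length ≤ fuel →
      PySem.Chars.count.go [c] fuel l acc = acc + l.count c := by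
  intro fuel
  induction fuel with
  | zero =>
      intro l acc h
      have : l = [] := List.eq_nil_of_length_eq_zero (Nat.le_zero.mp h)
      subst this; simp [PySem.Chars.count.go]
  | succ f ih =>
      intro l acc h
      cases l with
      | nil => simp [PySem.Chars.count.go]
      | cons x t =>
          simp only [PySem.Chars.count.go]
          by_cases hx : x = c
          · subst hx
            have hp : [x].isPrefixOf (x :: t) = true := by simp [List.isPrefixOf]
            rw [if_pos hp]
            simp only [List.length_singleton, List.drop_one, List.tail_cons]
            rw [ih t (acc + 1) (by simpa using Nat.lt_succ_iff.mp (by simpa using h))]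
            simp
            omega
          · have hp : [c].isPrefixOf (x :: t) = false := by
              simp [List.isPrefixOf]
              exact fun hh => hx hh.symm
            rw [if_neg (by simp [hp])]
            rw [ih t acc (by simpa using Nat.lt_succ_iff.mp (by simpa using h))]
            simp [hx]

lemma count_singleton (s : List Char) (c : Char) :
    PySem.Chars.count s [c] = s.count c := by
  rw [PySem.Chars.count]
  simpa using count_go_singleton c s.length s 0 le_rfl

-- if the last character is '.', A answers False whatever the state
lemma loop_last_dot :
    ∀ (l : List Char) (n i : Nat) (period : Bool), 1 ≤ i → i + l.length = n →
      l.getLast? = some '.' → periodLoop l n i period = some false := by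
  intro l
  induction l with
  | nil => intro n i period _ _ hl; simp at hl
  | cons x t ih =>
      intro n i period hi hn hl
      simp only [periodLoop]
      rw [if_neg (by rintro ⟨h1, _⟩; omega)]
      cases t with
      | nil =>
          simp only [List.getLast?_singleton, Option.some.injEq] at hl
          rw [if_pos ⟨by simp at hn; omega, hl⟩]
      | cons y t' =>
          have hlen : (y :: t').length ≥ 1 := by simp
          rw [if_neg (by rintro ⟨h1, _⟩; simp at hn; omega)]
          have hl' : (y :: t').getLast? = some '.' := by
            rwa [List.getLast?_cons_cons] at hl
          by_cases hx : x = '.'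
          · rw [if_pos hx]
            cases period with
            | true => simp
            | false =>
                simp only [Bool.not_false, if_pos]
                exact ih n (i + 1) true (by omega) (by simp at hn ⊢; omega) hl'
          · rw [if_neg hx]
            exact ih n (i + 1) period (by omega) (by simp at hn ⊢; omega) hl'

-- A's loop past the first character: answer determined by the '.'-count
lemma loop_mid :
    ∀ (l : List Char) (n i : Nat) (period : Bool), 1 ≤ i → i + l.length = n →
      l.getLast? ≠ some '.' →
      periodLoop l n i period =
        (if period then (if l.count '.' = 0 then some true else some false)
         else if l.count '.' = 0 then none
         else if l.count '.' = 1 then some true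
         else some false) := by
  intro l
  induction l with
  | nil =>
      intro n i period _ _ _
      cases period <;> simp [periodLoop]
  | cons x t ih =>
      intro n i period hi hn hl
      simp only [periodLoop]
      rw [if_neg (by rintro ⟨h1, _⟩; omega)]
      by_cases hx : x = '.'
      · subst hx
        cases t with
        | nil => exact absurd (by simp) hl
        | cons y t' =>
            rw [if_neg (by rintro ⟨h1, _⟩; simp at hn; omega)]
            rw [if_pos rfl]
            have hl' : (y :: t').getLast? ≠ some '.' := by
              rwa [List.getLast?_cons_cons] at hl
            cases period with
            | true => simp [List.count_cons]
            | false =>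
                simp only [Bool.not_false, if_pos]
                rw [ih n (i + 1) true (by omega) (by simp at hn ⊢; omega) hl']
                by_cases hc : (y :: t').count '.' = 0
                · simp [hc]
                · simp [List.count_cons]
      · rw [if_neg (by rintro ⟨_, h2⟩; exact hx h2)]
        rw [if_neg hx]
        have hl' : t.getLast? ≠ some '.' := by
          cases t with
          | nil => simp
          | cons y t' => rwa [List.getLast?_cons_cons] at hl
        rw [ih n (i + 1) period (by omega) (by simp at hn ⊢; omega) hl']
        simp [hx]

-- ===== VERDICT (by name: the statement is the Claim_ definition above) =====
lemma main_list (l : List Char) :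
    periodLoop l l.length 0 false =
      (if l.isEmpty = true then none
       else if PySem.List.pyGet? l 0 = some '.' ∨ PySem.List.pyGet? l (-1) = some '.' then some false
       else
         if PySem.Chars.count l ".".toList = 0 then none
         else if PySem.Chars.count l ".".toList = 1 then some true
         else some false) := by
  cases l with
  | nil => simp [periodLoop]
  | cons x t =>
      simp only [List.isEmpty_cons, Bool.false_eq_true, if_false]
      have hget0 : PySem.List.pyGet? (x :: t) 0 = some x := by
        simp
      have hgetm1 : PySem.List.pyGet? (x :: t) (-1) = (x :: t).getLast? :=
        PySem.List.pyGet?_neg_one (x :: t)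
      have hcnt : PySem.Chars.count (x :: t) ".".toList = (x :: t).count '.' := by
        rw [show ".".toList = ['.'] from rfl, count_singleton]
      simp only [periodLoop]
      by_cases hx : x = '.'
      · subst hx
        rw [if_pos (by simp)]
        rw [if_pos (Or.inl (by rw [hget0]))]
      · rw [if_neg (by rintro ⟨_, h2⟩; exact hx h2)]
        rw [if_neg (by rintro ⟨h1, h2⟩; exact hx h2)]
        rw [if_neg hx]
        by_cases hlast : (x :: t).getLast? = some '.'
        · have ht : t ≠ [] := by
            intro h; subst h; simp at hlast; exact hx hlast
          have hl' : t.getLast? = some '.' := by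
            cases t with
            | nil => exact absurd rfl ht
            | cons y t' => rwa [List.getLast?_cons_cons] at hlast
          rw [loop_last_dot t ((x :: t).length) 1 false (le_refl 1) (by simp; omega) hl']
          rw [if_pos (Or.inr (by rw [hgetm1, hlast]))]
        · have hl' : t.getLast? ≠ some '.' := by
            cases t with
            | nil => simp
            | cons y t' => rwa [List.getLast?_cons_cons] at hlast
          rw [loop_mid t ((x :: t).length) 1 false (le_refl 1) (by simp; omega) hl']
          have hcond : ¬(PySem.List.pyGet? (x :: t) 0 = some '.' ∨
              PySem.List.pyGet? (x :: t) (-1) = some '.') := by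
            rw [hget0, hgetm1]
            push Not
            exact ⟨by simp [hx], hlast⟩
          rw [if_neg hcond, hcnt]
          simp [hx]

theorem period_checker_spec : Claim_equal_period_checker := by
  intro input _
  unfold Spec_period_checker period_checker period_checker_alt
  simp only [PySem.Str.pyGet?_eq, PySem.Chars.pyGet?_eq_listPyGet?, PySem.Str.count_eq]
  exact main_list input.toList
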